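-- pv_equiv track=rewrite | github.com/Gadisa21/Competitive_Programming | maximumSum.py | maxSumRangeQuery
-- ===== SOURCE A (Python) =====
-- def maxSumRangeQuery(nums, requests):
--     Mode=10**9 +7
--     req=[0]*len(nums)
--     res=0
--     prefix=0
--     for re in requests:
--         start,end=re
--         req[start]+=1
--         if end+1 <len(nums):
--             req[end+1]-=1
--     for i in range(len(nums)):
--         prefix+=req[i]
--
--         req[i]=prefix
--     req.sort()
--     nums.sort()
--     for i in range(len(nums)):
--         res=(res+req[i]*nums[i])%Mode
--     return res
-- ===== SOURCE B (Python) =====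
-- def maxSumRangeQuery(nums, requests):
--     MOD = 10 ** 9 + 7
--     freq = [0] * len(nums)
--     for start, end in requests:
--         for i in range(start, end + 1):
--             freq[i] += 1
--     freq.sort()
--     nums.sort()
--     return sum(f * v for f, v in zip(freq, nums)) % MOD
-- ===== Notes on version B (the rewrite author's own statement) =====
-- stated objective: simpler
-- what changed: Replaces the difference-array (+1/-1 marks followed by a prefix-sum pass) with direct per-request counting (freq[i] += 1 over each inclusive range) and one final mod over the zipped sum instead of a per-iteration mod; like A, B sorts nums in place. Pre_ restricts to well-formed requests (length-2 [s,e] with 0 <= s <= e < len(nums)), the task's natural domain; on malformed requests neither behaviour is specified and the programs diverge or raise.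
-- outside the precondition, e.g. on maxSumRangeQuery([1, 2, 3], [[-1, 1]]): A returns 0, B returns 6; on maxSumRangeQuery([1, 2, 3], [[2, 0]]): A returns 1000000006, B returns 0
import Mathlib
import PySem

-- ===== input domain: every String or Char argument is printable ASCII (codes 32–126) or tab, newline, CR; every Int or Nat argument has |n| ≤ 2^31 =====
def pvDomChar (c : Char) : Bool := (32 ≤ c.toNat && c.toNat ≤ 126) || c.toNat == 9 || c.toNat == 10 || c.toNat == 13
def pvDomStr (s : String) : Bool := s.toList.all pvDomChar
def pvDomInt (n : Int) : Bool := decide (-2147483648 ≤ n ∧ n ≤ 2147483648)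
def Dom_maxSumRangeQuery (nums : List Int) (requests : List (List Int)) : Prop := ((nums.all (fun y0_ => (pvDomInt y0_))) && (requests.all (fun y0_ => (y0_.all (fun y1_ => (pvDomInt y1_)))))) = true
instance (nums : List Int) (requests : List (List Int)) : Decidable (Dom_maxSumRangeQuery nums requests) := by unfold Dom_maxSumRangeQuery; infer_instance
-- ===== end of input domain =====

-- B replaces A's difference-array + prefix-sum pass by direct per-request counting and one final mod;
-- both A and B sort `nums` in place in Python (the theorems here are about the return value).

-- ===== PORT A =====
-- the prefix-sum pass 'for i in range(len(nums)): prefix += req[i]; req[i] = prefix'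
def pvPrefixPass : List Int → Int → List Int
  | [], _ => []
  | x :: xs, p => (p + x) :: pvPrefixPass xs (p + x)

def maxSumRangeQuery (nums : List Int) (requests : List (List Int)) : Int :=
  let Mode : Int := 10 ^ 9 + 7
  -- req = [0]*len(nums)
  let req : List Int := List.replicate nums.length 0
  -- first loop: difference-array marks (start, end = re ported as re[0], re[1]; exact when len(re) = 2, guaranteed by Pre_)
  let req := requests.foldl (fun req re =>
    let start := PySem.List.pyGetD re 0 0
    let e := PySem.List.pyGetD re 1 0
    let req := PySem.List.pySetD req start (PySem.List.pyGetD req start 0 + 1)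
    if e + 1 < (nums.length : Int) then
      PySem.List.pySetD req (e + 1) (PySem.List.pyGetD req (e + 1) 0 - 1)
    else req) req
  -- second loop: running prefix written back into req
  let req := pvPrefixPass req 0
  -- req.sort(); nums.sort()
  let reqS := PySem.List.sorted req (fun x => x) false
  let numsS := PySem.List.sorted nums (fun x => x) false
  -- final loop: res = (res + req[i]*nums[i]) % Mode
  (reqS.zip numsS).foldl (fun res p => PySem.Int.mod (res + p.1 * p.2) Mode) 0

-- ===== PORT B =====
def maxSumRangeQuery_alt (nums : List Int) (requests : List (List Int)) : Int :=
  let MOD : Int := 10 ^ 9 + 7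
  let freq : List Int := List.replicate nums.length 0
  -- for start, end in requests: for i in range(start, end+1): freq[i] += 1
  let freq := requests.foldl (fun freq re =>
    let start := PySem.List.pyGetD re 0 0
    let e := PySem.List.pyGetD re 1 0
    (PySem.List.pyRange start (e + 1) 1).foldl
      (fun f i => PySem.List.pySetD f i (PySem.List.pyGetD f i 0 + 1)) freq) freq
  let freqS := PySem.List.sorted freq (fun x => x) false
  let numsS := PySem.List.sorted nums (fun x => x) false
  -- sum(f*v for f, v in zip(freq, nums)) % MOD
  PySem.Int.mod ((freqS.zip numsS).foldl (fun a p => a + p.1 * p.2) 0) MOD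

-- ===== PRECONDITION & SPEC =====
-- Pre_ restricts to the task's natural domain: well-formed range requests, i.e. length-2 lists [s, e] with
-- 0 ≤ s ≤ e < len(nums). On malformed requests neither behaviour is specified and the two programs legitimately
-- diverge (A reads them through its difference array, B counts an empty range); on most of them one or both raise.
def Pre_maxSumRangeQuery (nums : List Int) (requests : List (List Int)) : Prop :=
  ∀ re ∈ requests, re.length = 2 ∧ 0 ≤ re.getD 0 0 ∧ re.getD 0 0 ≤ re.getD 1 0 ∧
    re.getD 1 0 < (nums.length : Int)

instance (nums : List Int) (requests : List (List Int)) : Decidable (Pre_maxSumRangeQuery nums requests) := by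
  unfold Pre_maxSumRangeQuery; infer_instance

def pvWitness_maxSumRangeQuery : List Int × List (List Int) := ([3, -1, 2], [[0, 1], [1, 2], [0, 2]])

def Spec_maxSumRangeQuery (nums : List Int) (requests : List (List Int)) (out : Int) : Prop :=
  out = maxSumRangeQuery_alt nums requests

instance (nums : List Int) (requests : List (List Int)) (out : Int) : Decidable (Spec_maxSumRangeQuery nums requests out) := by
  unfold Spec_maxSumRangeQuery; infer_instance

-- ===== CLAIM =====
def Claim_equal_maxSumRangeQuery : Prop :=
  ∀ (nums : List Int) (requests : List (List Int)), Dom_maxSumRangeQuery nums requests →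
    Pre_maxSumRangeQuery nums requests →
    Spec_maxSumRangeQuery nums requests (maxSumRangeQuery nums requests)

-- ===== LEMMAS AND PROOFS =====

theorem pv_len_prefixPass (d : List Int) (p : Int) : (pvPrefixPass d p).length = d.length := by
  induction d generalizing p with
  | nil => rfl
  | cons x xs ih => simp [pvPrefixPass, ih]

theorem pv_getD_prefixPass (d : List Int) (p : Int) (i : Nat) (hi : i < d.length) :
    (pvPrefixPass d p).getD i 0 = p + (d.take (i + 1)).sum := by
  induction d generalizing p i with
  | nil => simp at hi
  | cons x xs ih =>
      cases i with
      | zero => simp [pvPrefixPass]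
      | succ j =>
          simp only [pvPrefixPass, List.getD_cons_succ, List.take_succ_cons, List.sum_cons]
          rw [ih (p + x) j (by simpa using hi)]
          ring

theorem pv_sum_take_set (d : List Int) (k : Nat) (x : Int) (i : Nat) (hk : k < d.length) :
    ((d.set k (d.getD k 0 + x)).take i).sum = (d.take i).sum + if k < i then x else 0 := by
  induction d generalizing k i with
  | nil => simp at hk
  | cons y ys ih =>
      cases k with
      | zero =>
          cases i with
          | zero => simp
          | succ j => simp; ring
      | succ m =>
          cases i with
          | zero => simp
          | succ j =>
              simp only [List.set_cons_succ, List.take_succ_cons, List.sum_cons,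
                List.getD_cons_succ]
              rw [ih m j (by simpa using hk)]
              have : (if m + 1 < j + 1 then x else (0:Int)) = if m < j then x else 0 := by
                split_ifs <;> omega
              rw [this]; ring

theorem pv_getD_pySetD (f : List Int) (k i v : Int) (hk0 : 0 ≤ k) (_hk : k < (f.length : Int))
    (hi0 : 0 ≤ i) (hi : i < (f.length : Int)) :
    PySem.List.pyGetD (PySem.List.pySetD f k v) i 0 = if i = k then v else PySem.List.pyGetD f i 0 := by
  rw [PySem.List.pySetD_of_nonneg _ _ hk0]
  rw [PySem.List.pyGetD_eq_getElem _ _ hi0 (by simpa using hi)]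
  rw [List.getElem_set]
  by_cases h : i = k
  · simp [h]
  · have hne : ¬ k.toNat = i.toNat := by omega
    rw [if_neg hne, if_neg h, PySem.List.pyGetD_eq_getElem _ _ hi0 hi]

theorem pv_len_pySetD_int (f : List Int) (k v : Int) :
    (PySem.List.pySetD f k v).length = f.length := PySem.List.length_pySetD f k v

-- B's inner loop: each index of [s, e] is incremented once
theorem pv_bump_getD (e i : Int) (hi0 : 0 ≤ i) :
    ∀ (m : Nat) (s : Int) (f : List Int), ((e + 1) - s).toNat = m → 0 ≤ s →
      e < (f.length : Int) → i < (f.length : Int) →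
      PySem.List.pyGetD ((PySem.List.pyRange s (e + 1) 1).foldl
        (fun f i => PySem.List.pySetD f i (PySem.List.pyGetD f i 0 + 1)) f) i 0
      = PySem.List.pyGetD f i 0 + (if s ≤ i ∧ i ≤ e then 1 else 0) := by
  intro m
  induction m with
  | zero =>
      intro s f hm hs he hi
      rw [PySem.List.pyRange_one_eq_nil (by omega)]
      have : ¬ (s ≤ i ∧ i ≤ e) := by omega
      simp [this]
  | succ m ih =>
      intro s f hm hs he hi
      rw [PySem.List.pyRange_one_cons (by omega)]
      simp only [List.foldl_cons]
      rw [ih (s + 1) _ (by omega) (by omega) (by simp; exact he)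
        (by simp; exact hi)]
      rw [pv_getD_pySetD f s i _ hs (by omega) hi0 hi]
      by_cases h : i = s
      · subst h
        have h1 : ¬ (i + 1 ≤ i) := by omega
        have h2 : i ≤ i ∧ i ≤ e := ⟨le_refl i, by omega⟩
        simp [h1, h2]
      · rw [if_neg h]
        split_ifs <;> first | rfl | omega

theorem pv_len_bump (e : Int) :
    ∀ (m : Nat) (s : Int) (f : List Int), ((e + 1) - s).toNat = m →
      ((PySem.List.pyRange s (e + 1) 1).foldl
        (fun f i => PySem.List.pySetD f i (PySem.List.pyGetD f i 0 + 1)) f).length = f.length := by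
  intro m
  induction m with
  | zero =>
      intro s f hm
      rw [PySem.List.pyRange_one_eq_nil (by omega)]
      rfl
  | succ m ih =>
      intro s f hm
      rw [PySem.List.pyRange_one_cons (by omega)]
      simp only [List.foldl_cons]
      rw [ih (s + 1) _ (by omega), pv_len_pySetD_int]

-- A's per-request diff-array update, measured through prefix sums of take
theorem pv_diff_take_sum (n : Nat) (d : List Int) (hd : d.length = n) (s e : Int)
    (hs : 0 ≤ s) (hse : s ≤ e) (he : e < (n : Int)) (i : Nat) (hi : i < n) :
    ((if e + 1 < (n : Int) then
        PySem.List.pySetD (PySem.List.pySetD d s (PySem.List.pyGetD d s 0 + 1)) (e + 1)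
          (PySem.List.pyGetD (PySem.List.pySetD d s (PySem.List.pyGetD d s 0 + 1)) (e + 1) 0 - 1)
      else PySem.List.pySetD d s (PySem.List.pyGetD d s 0 + 1)).take (i + 1)).sum
    = (d.take (i + 1)).sum + (if s ≤ (i : Int) ∧ (i : Int) ≤ e then 1 else 0) := by
  have hsd : s < (d.length : Int) := by omega
  have hset : PySem.List.pySetD d s (PySem.List.pyGetD d s 0 + 1)
      = d.set s.toNat (d.getD s.toNat 0 + 1) := by
    rw [PySem.List.pySetD_of_nonneg _ _ hs, PySem.List.pyGetD_eq_getElem _ _ hs hsd,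
      List.getD_eq_getElem d 0 (by omega)]
  by_cases hcase : e + 1 < (n : Int)
  · rw [if_pos hcase]
    have hlen1 : (PySem.List.pySetD d s (PySem.List.pyGetD d s 0 + 1)).length = d.length :=
      pv_len_pySetD_int _ _ _
    have he1 : (0 : Int) ≤ e + 1 := by omega
    have hset2 : PySem.List.pySetD (PySem.List.pySetD d s (PySem.List.pyGetD d s 0 + 1)) (e + 1)
        (PySem.List.pyGetD (PySem.List.pySetD d s (PySem.List.pyGetD d s 0 + 1)) (e + 1) 0 - 1)
        = (PySem.List.pySetD d s (PySem.List.pyGetD d s 0 + 1)).set (e + 1).toNat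
          ((PySem.List.pySetD d s (PySem.List.pyGetD d s 0 + 1)).getD (e + 1).toNat 0 + (-1)) := by
      rw [PySem.List.pySetD_of_nonneg _ _ he1,
        PySem.List.pyGetD_eq_getElem _ _ he1 (by rw [hlen1]; omega),
        List.getD_eq_getElem _ 0 (by rw [hlen1]; omega)]
      ring_nf
    rw [hset2, pv_sum_take_set _ _ _ _ (by rw [hlen1]; omega), hset,
      pv_sum_take_set _ _ _ _ (by omega)]
    have h1 : s.toNat < i + 1 ↔ s ≤ (i : Int) := by omega
    have h2 : (e + 1).toNat < i + 1 ↔ ¬ ((i : Int) ≤ e) := by omega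
    by_cases ha : s ≤ (i : Int) <;> by_cases hb : (i : Int) ≤ e <;>
      simp [h1.mpr, h2, ha, hb] <;> omega
  · rw [if_neg hcase, hset, pv_sum_take_set _ _ _ _ (by omega)]
    have hb : (i : Int) ≤ e := by omega
    have h1 : s.toNat < i + 1 ↔ s ≤ (i : Int) := by omega
    by_cases ha : s ≤ (i : Int) <;> simp [h1, ha, hb]

-- the loop invariant: B's freq list is the prefix-sum transform of A's diff list
theorem pv_loops_agree (n : Nat) :
    ∀ (requests : List (List Int)),
      (∀ re ∈ requests, re.length = 2 ∧ 0 ≤ re.getD 0 0 ∧ re.getD 0 0 ≤ re.getD 1 0 ∧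
        re.getD 1 0 < (n : Int)) →
      ∀ (d f : List Int), d.length = n → f.length = n →
      (∀ i : Nat, i < n → f.getD i 0 = (d.take (i + 1)).sum) →
      (requests.foldl (fun freq re =>
          let start := PySem.List.pyGetD re 0 0
          let e := PySem.List.pyGetD re 1 0
          (PySem.List.pyRange start (e + 1) 1).foldl
            (fun f i => PySem.List.pySetD f i (PySem.List.pyGetD f i 0 + 1)) freq) f)
      = pvPrefixPass (requests.foldl (fun req re =>
          let start := PySem.List.pyGetD re 0 0
          let e := PySem.List.pyGetD re 1 0
          let req := PySem.List.pySetD req start (PySem.List.pyGetD req start 0 + 1)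
          if e + 1 < (n : Int) then
            PySem.List.pySetD req (e + 1) (PySem.List.pyGetD req (e + 1) 0 - 1)
          else req) d) 0 := by
  intro requests
  induction requests with
  | nil =>
      intro _ d f hd hf hinv
      simp only [List.foldl_nil]
      apply List.ext_getElem (by rw [hf, pv_len_prefixPass, hd])
      intro i h1 h2
      have hi : i < n := by rwa [hf] at h1
      have hdi : i < d.length := by omega
      calc f[i] = f.getD i 0 := (List.getD_eq_getElem f 0 h1).symm
        _ = (d.take (i + 1)).sum := hinv i hi
        _ = 0 + (d.take (i + 1)).sum := by ring
        _ = (pvPrefixPass d 0).getD i 0 := (pv_getD_prefixPass d 0 i hdi).symm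
        _ = (pvPrefixPass d 0)[i] := List.getD_eq_getElem _ 0 h2
  | cons re rest ih =>
      intro hreq d f hd hf hinv
      obtain ⟨hlen2, hs, hse, he⟩ := hreq re List.mem_cons_self
      obtain ⟨a, b, rfl⟩ : ∃ a b, re = [a, b] := by
        match re, hlen2 with
        | [a, b], _ => exact ⟨a, b, rfl⟩
      simp only [List.getD_cons_zero, List.getD_cons_succ] at hs hse he
      simp only [List.foldl_cons]
      have h0 : PySem.List.pyGetD [a, b] 0 0 = a := by simp [pysem]
      have h1 : PySem.List.pyGetD [a, b] 1 0 = b := by simp [pysem]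
      rw [h0, h1]
      set d' := (if b + 1 < (n : Int) then
          PySem.List.pySetD (PySem.List.pySetD d a (PySem.List.pyGetD d a 0 + 1)) (b + 1)
            (PySem.List.pyGetD (PySem.List.pySetD d a (PySem.List.pyGetD d a 0 + 1)) (b + 1) 0 - 1)
        else PySem.List.pySetD d a (PySem.List.pyGetD d a 0 + 1)) with hd'
      set f' := ((PySem.List.pyRange a (b + 1) 1).foldl
          (fun f i => PySem.List.pySetD f i (PySem.List.pyGetD f i 0 + 1)) f) with hf'
      have hd'len : d'.length = n := by
        rw [hd']; split <;> simp [hd]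
      have hf'len : f'.length = n := by
        rw [hf', pv_len_bump b ((b + 1) - a).toNat a f rfl, hf]
      apply ih (fun r hr => hreq r (List.mem_cons_of_mem _ hr)) d' f' hd'len hf'len
      intro i hi
      have hfi : (i : Int) < (f.length : Int) := by rw [hf]; exact_mod_cast hi
      have hbump := pv_bump_getD b (i : Int) (by positivity) ((b + 1) - a).toNat a f rfl hs
        (by rw [hf]; exact he) hfi
      have hdiff := pv_diff_take_sum n d hd a b hs hse he i hi
      have hgd : f'.getD i 0 = PySem.List.pyGetD f' (i : Int) 0 := by
        simp [PySem.List.pyGetD_natCast]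
      have hgf : PySem.List.pyGetD f (i : Int) 0 = f.getD i 0 := by
        simp [PySem.List.pyGetD_natCast]
      rw [hgd, hf', hbump, hgf, hinv i hi, hd', hdiff]

-- folding (res + x) % M step by step equals one final mod
theorem pv_foldl_mod (M : Int) (hM : 0 < M) (l : List (Int × Int)) :
    ∀ a : Int, l.foldl (fun res p => PySem.Int.mod (res + p.1 * p.2) M) (PySem.Int.mod a M)
      = PySem.Int.mod (l.foldl (fun res p => res + p.1 * p.2) a) M := by
  induction l with
  | nil => intro a; rfl
  | cons p l ih =>
      intro a
      simp only [List.foldl_cons]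
      rw [← ih (a + p.1 * p.2)]
      congr 1
      simp only [PySem.Int.mod_eq_emod_of_pos hM]
      rw [Int.add_emod, Int.emod_emod_of_dvd _ dvd_rfl, ← Int.add_emod]

-- ===== VERDICT =====
theorem maxSumRangeQuery_spec : Claim_equal_maxSumRangeQuery := by
  intro nums requests _ hpre
  unfold Spec_maxSumRangeQuery maxSumRangeQuery maxSumRangeQuery_alt
  dsimp only
  rw [pv_loops_agree nums.length requests hpre (List.replicate nums.length 0)
    (List.replicate nums.length 0) (by simp) (by simp) (by intro i hi; simp)]
  have hM : (0 : Int) < 10 ^ 9 + 7 := by norm_num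
  have hz : PySem.Int.mod 0 (10 ^ 9 + 7) = 0 := by
    rw [PySem.Int.mod_eq_emod_of_pos hM]; simp
  have := pv_foldl_mod (10 ^ 9 + 7) hM
    ((PySem.List.sorted (pvPrefixPass (requests.foldl (fun req re =>
        let start := PySem.List.pyGetD re 0 0
        let e := PySem.List.pyGetD re 1 0
        let req := PySem.List.pySetD req start (PySem.List.pyGetD req start 0 + 1)
        if e + 1 < (nums.length : Int) then
          PySem.List.pySetD req (e + 1) (PySem.List.pyGetD req (e + 1) 0 - 1)
        else req) (List.replicate nums.length 0)) 0) (fun x => x) false).zip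
      (PySem.List.sorted nums (fun x => x) false)) 0
  rw [hz] at this
  exact this
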